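-- pv_equiv track=rewrite | github.com/Luolingwei/LeetCode | UnionFind/Q1102_Path With Maximum Minimum Value.py | maximumMinimumPath2
-- ===== SOURCE A (Python) =====
-- import heapq
--
-- def maximumMinimumPath2(A):
--     m, n = len(A), len(A[0])
--     q = [(-A[0][0], 0, 0)]
--     visited = [[0]*n for _ in range(m)]
--     visited[0][0] = 1
--     while q:
--         v, x, y = heapq.heappop(q)
--         if (x,y) == (m-1,n-1): return -v
--         for nx,ny in [(x-1,y),(x+1,y),(x,y-1),(x,y+1)]:
--             if 0<=nx<m and 0<=ny<n and not visited[nx][ny]: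
--                 visited[nx][ny] = 1
--                 heapq.heappush(q,(-min(-v,A[nx][ny]), nx, ny))
--     return -1
-- ===== SOURCE B (Python) =====
-- def maximumMinimumPath2(A):
--     m, n = len(A), len(A[0])
--     vals = sorted({v for row in A for v in row[:n]}, reverse=True)
--     for t in vals:
--         if A[0][0] >= t and _reaches(A, m, n, t):
--             return t
--     return -1
--
-- def _reaches(A, m, n, t):
--     # flood fill from (0,0) over cells with value >= t, iterative DFS
--     seen = {(0, 0)}
--     stack = [(0, 0)]
--     while stack:
--         x, y = stack.pop()
--         if (x, y) == (m - 1, n - 1):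
--             return True
--         for nx, ny in ((x - 1, y), (x + 1, y), (x, y - 1), (x, y + 1)):
--             if 0 <= nx < m and 0 <= ny < n and (nx, ny) not in seen and A[nx][ny] >= t:
--                 seen.add((nx, ny))
--                 stack.append((nx, ny))
--     return False
-- ===== Notes on version B (the rewrite author's own statement) =====
-- stated objective: alternative
-- what changed: Replaces the best-first (heap) Dijkstra-style search by a completely different strategy: sort the distinct grid values descending and return the first threshold t for which a DFS flood fill over cells with value >= t connects (0,0) to (m-1,n-1).
-- outside the precondition, e.g. on maximumMinimumPath2([[9, 5, 3, 0], [1, 1, 0], [9, 3, 8, 6]]): A returns 1, B returns 1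
import Mathlib
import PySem

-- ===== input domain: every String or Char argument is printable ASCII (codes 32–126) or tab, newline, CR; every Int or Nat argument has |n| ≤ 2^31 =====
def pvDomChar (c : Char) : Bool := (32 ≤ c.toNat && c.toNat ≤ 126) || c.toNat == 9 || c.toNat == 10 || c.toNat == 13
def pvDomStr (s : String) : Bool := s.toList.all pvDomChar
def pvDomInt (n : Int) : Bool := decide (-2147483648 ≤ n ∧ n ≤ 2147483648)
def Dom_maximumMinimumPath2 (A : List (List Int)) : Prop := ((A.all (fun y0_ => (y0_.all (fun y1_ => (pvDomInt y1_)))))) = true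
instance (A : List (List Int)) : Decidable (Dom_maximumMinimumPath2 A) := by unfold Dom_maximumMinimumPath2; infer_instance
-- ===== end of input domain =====

-- B replaces A's heap-based best-first search by a descending scan over the distinct grid
-- values with a DFS flood-fill connectivity test (objective: alternative algorithm, same result).

-- ===== PORT A =====

-- A[x][y] for indices the programs only use in range (0 ≤ x < len A, 0 ≤ y < n ≤ len (A[x])); exact there.
def pvGV (A : List (List Int)) (x y : Int) : Int :=
  PySem.List.pyGetD (PySem.List.pyGetD A x []) y 0

-- the neighbour list [(x-1,y),(x+1,y),(x,y-1),(x,y+1)]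
def pvNbrs (x y : Int) : List (Int × Int) := [(x-1,y),(x+1,y),(x,y-1),(x,y+1)]

-- Python tuple order on the heap triples (lexicographic ≤)
def pvTripLe (a b : Int × Int × Int) : Bool :=
  decide (a.1 < b.1 ∨ (a.1 = b.1 ∧ (a.2.1 < b.2.1 ∨ (a.2.1 = b.2.1 ∧ a.2.2 ≤ b.2.2))))

-- heapq modelled by its observable behaviour: heappop returns the smallest triple (Python tuple
-- order) with the remaining elements, heappush appends.  Exact: the only outputs heapq produces
-- in A are the successive popped minima, and A's heap never holds two equal triples.
def pvPopMin : List (Int × Int × Int) → Option ((Int × Int × Int) × List (Int × Int × Int))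
  | [] => none
  | a :: l =>
    match pvPopMin l with
    | none => some (a, [])
    | some (m, r) => if pvTripLe a m then some (a, l) else some (m, a :: r)

-- visited[x][y] = 1
def pvMark (vis : List (List Int)) (x y : Int) : List (List Int) :=
  PySem.List.pySetD vis x (PySem.List.pySetD (PySem.List.pyGetD vis x []) y 1)

-- the while loop of A; fuel is only a termination device (m*n suffices, proved below)
def pvLoopA (A : List (List Int)) (m n : Int) : Nat → List (Int × Int × Int) → List (List Int) → Int
  | 0, _, _ => -1
  | fuel+1, q, vis =>
    match pvPopMin q with
    | none => -1
    | some (e, q') =>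
      if e.2.1 = m - 1 ∧ e.2.2 = n - 1 then -e.1
      else
        let st := (pvNbrs e.2.1 e.2.2).foldl
          (fun (st : List (Int × Int × Int) × List (List Int)) c =>
            if 0 ≤ c.1 ∧ c.1 < m ∧ 0 ≤ c.2 ∧ c.2 < n ∧ pvGV st.2 c.1 c.2 = 0 then
              (st.1 ++ [(-(min (-e.1) (pvGV A c.1 c.2)), c.1, c.2)], pvMark st.2 c.1 c.2)
            else st)
          (q', vis)
        pvLoopA A m n fuel st.1 st.2

def maximumMinimumPath2 (A : List (List Int)) : Int :=
  let m : Int := PySem.List.len A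
  let n : Int := PySem.List.len (PySem.List.pyGetD A 0 [])
  let q : List (Int × Int × Int) := [(-(pvGV A 0 0), 0, 0)]
  let vis := pvMark (List.replicate m.toNat (List.replicate n.toNat 0)) 0 0
  pvLoopA A m n (m.toNat * n.toNat) q vis

-- ===== PORT B =====

-- the while loop of _reaches; the Lean stack list keeps its top at the head (Python pops the
-- last element, so each accepted neighbour is consed instead of appended); fuel as in A.
def pvReachLoop (A : List (List Int)) (m n t : Int) : Nat → List (Int × Int) → PySem.Set (Int × Int) → Bool
  | 0, _, _ => false
  | fuel+1, stack, seen =>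
    match stack with
    | [] => false
    | c :: stack' =>
      if c.1 = m - 1 ∧ c.2 = n - 1 then true
      else
        let st := (pvNbrs c.1 c.2).foldl
          (fun (st : List (Int × Int) × PySem.Set (Int × Int)) d =>
            if 0 ≤ d.1 ∧ d.1 < m ∧ 0 ≤ d.2 ∧ d.2 < n ∧ d ∉ st.2 ∧ t ≤ pvGV A d.1 d.2 then
              (d :: st.1, PySem.Set.add st.2 d)
            else st)
          (stack', seen)
        pvReachLoop A m n t fuel st.1 st.2

def pvReaches (A : List (List Int)) (m n t : Int) : Bool :=
  pvReachLoop A m n t (m.toNat * n.toNat) [(0,0)] (PySem.Set.add PySem.Set.empty (0,0))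

-- the for loop over the sorted distinct values
def pvScan (A : List (List Int)) (m n : Int) : List Int → Int
  | [] => -1
  | t :: rest =>
    if t ≤ pvGV A 0 0 ∧ pvReaches A m n t = true then t
    else pvScan A m n rest

def maximumMinimumPath2_alt (A : List (List Int)) : Int :=
  let m : Int := PySem.List.len A
  let n : Int := PySem.List.len (PySem.List.pyGetD A 0 [])
  let vals := PySem.List.sorted
    (PySem.Set.ofList (A.flatMap (fun row => PySem.List.slice row none (some n))))
    (fun v => v) true
  pvScan A m n vals

-- ===== PRECONDITION & SPEC =====

-- Pre_ excludes the empty grid and an empty first row (A raises IndexError) and ragged grids with a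
-- row shorter than the first: on those A raises IndexError on almost every instance, and whether it
-- raises or still returns is an artefact of the incidental probe order of its search (B likewise).
def Pre_maximumMinimumPath2 (A : List (List Int)) : Prop :=
  A ≠ [] ∧ A.getD 0 [] ≠ [] ∧ ∀ r ∈ A, (A.getD 0 []).length ≤ r.length

instance (A : List (List Int)) : Decidable (Pre_maximumMinimumPath2 A) := by
  unfold Pre_maximumMinimumPath2; infer_instance

def pvWitness_maximumMinimumPath2 : List (List Int) := [[5, 1], [4, 3]]

def Spec_maximumMinimumPath2 (A : List (List Int)) (out : Int) : Prop := out = maximumMinimumPath2_alt A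
instance (A : List (List Int)) (out : Int) : Decidable (Spec_maximumMinimumPath2 A out) := by unfold Spec_maximumMinimumPath2; infer_instance

-- ===== CLAIM (what is proved, stated in full; the proofs are below) =====
def Claim_equal_maximumMinimumPath2 : Prop := ∀ (A : List (List Int)), Dom_maximumMinimumPath2 A → Pre_maximumMinimumPath2 A → Spec_maximumMinimumPath2 A (maximumMinimumPath2 A)

-- ===== LEMMAS AND PROOFS =====

-- reachability from (0,0) over cells of value ≥ t (the common specification of both searches)
inductive pvReach (A : List (List Int)) (m n t : Int) : Int → Int → Prop
  | start : t ≤ pvGV A 0 0 → pvReach A m n t 0 0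
  | step {x y x' y' : Int} : pvReach A m n t x y → (x', y') ∈ pvNbrs x y →
      0 ≤ x' → x' < m → 0 ≤ y' → y' < n → t ≤ pvGV A x' y' → pvReach A m n t x' y'

theorem pvReach_mono {A m n} {s t : Int} (hst : s ≤ t) {x y} (h : pvReach A m n t x y) :
    pvReach A m n s x y := by
  induction h with
  | start h0 => exact .start (le_trans hst h0)
  | step _ hadj hx0 hxm hy0 hyn hval ih => exact .step ih hadj hx0 hxm hy0 hyn (le_trans hst hval)

theorem pvReach_start_le {A m n t x y} (h : pvReach A m n t x y) : t ≤ pvGV A 0 0 := by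
  induction h with
  | start h0 => exact h0
  | step _ _ _ _ _ _ _ ih => exact ih

-- ## basic facts about the heap order and pvPopMin
theorem pvTripLe_refl (a : Int × Int × Int) : pvTripLe a a = true := by
  simp [pvTripLe]

theorem pvTripLe_trans {a b c : Int × Int × Int} (h1 : pvTripLe a b = true)
    (h2 : pvTripLe b c = true) : pvTripLe a c = true := by
  unfold pvTripLe at *; simp only [decide_eq_true_eq] at *; omega

theorem pvTripLe_total {a b : Int × Int × Int} (h : ¬ pvTripLe a b = true) :
    pvTripLe b a = true := by
  unfold pvTripLe at *; simp only [decide_eq_true_eq] at *; omega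

theorem pvTripLe_fst {a b : Int × Int × Int} (h : pvTripLe a b = true) : a.1 ≤ b.1 := by
  unfold pvTripLe at h; simp only [decide_eq_true_eq] at h; omega

theorem pvPopMin_eq_none_iff (l : List (Int × Int × Int)) : pvPopMin l = none ↔ l = [] := by
  cases l with
  | nil => simp [pvPopMin]
  | cons a t =>
    simp only [pvPopMin]
    cases h : pvPopMin t with
    | none => simp
    | some p => cases p with | mk m r => by_cases hle : pvTripLe a m = true <;> simp [hle]

theorem pvPopMin_spec : ∀ (l : List (Int × Int × Int)) (e : Int × Int × Int)
    (l' : List (Int × Int × Int)), pvPopMin l = some (e, l') →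
    l.Perm (e :: l') ∧ ∀ x ∈ l, pvTripLe e x = true := by
  intro l
  induction l with
  | nil => intro e l' h; simp [pvPopMin] at h
  | cons a t ih =>
    intro e l' h
    simp only [pvPopMin] at h
    cases ht : pvPopMin t with
    | none =>
      rw [ht] at h
      simp only [Option.some.injEq, Prod.mk.injEq] at h
      obtain ⟨he, hl'⟩ := h
      have htnil : t = [] := (pvPopMin_eq_none_iff t).mp ht
      subst he; subst hl'; subst htnil
      exact ⟨List.Perm.refl _, by intro x hx; simp at hx; subst hx; exact pvTripLe_refl _⟩
    | some p =>
      rw [ht] at h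
      obtain ⟨m, r⟩ := p
      obtain ⟨hperm, hmin⟩ := ih m r ht
      by_cases hle : pvTripLe a m = true
      · simp only [hle, if_pos] at h
        simp only [Option.some.injEq, Prod.mk.injEq] at h
        obtain ⟨he, hl'⟩ := h; subst he; subst hl'
        refine ⟨List.Perm.refl _, ?_⟩
        intro x hx
        rcases List.mem_cons.mp hx with hx | hx
        · subst hx; exact pvTripLe_refl _
        · exact pvTripLe_trans hle (hmin x hx)
      · simp only [if_neg hle] at h
        simp only [Option.some.injEq, Prod.mk.injEq] at h
        obtain ⟨he, hl'⟩ := h; subst he; subst hl'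
        refine ⟨?_, ?_⟩
        · exact List.Perm.trans (List.Perm.cons a hperm) (List.Perm.swap m a r)
        · intro x hx
          rcases List.mem_cons.mp hx with hx | hx
          · subst hx; exact pvTripLe_total hle
          · exact hmin x hx

-- ## matrix helpers
def pvShape (vis : List (List Int)) (M N : Nat) : Prop :=
  vis.length = M ∧ ∀ r ∈ vis, r.length = N

theorem pvGV_eq_getElem (vis : List (List Int)) (x y : Int) (hx0 : 0 ≤ x)
    (hx : x.toNat < vis.length) (hy0 : 0 ≤ y) (hy : y.toNat < (vis[x.toNat]).length) :
    pvGV vis x y = vis[x.toNat][y.toNat] := by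
  unfold pvGV
  rw [PySem.List.pyGetD_eq_getElem vis [] hx0 (by omega),
      PySem.List.pyGetD_eq_getElem _ 0 hy0 (by omega)]

theorem pvMark_eq (vis : List (List Int)) (x y : Int) (hx0 : 0 ≤ x) (hy0 : 0 ≤ y)
    (hx : x.toNat < vis.length) :
    pvMark vis x y = vis.set x.toNat (vis[x.toNat].set y.toNat 1) := by
  unfold pvMark
  rw [PySem.List.pySetD_of_nonneg _ _ hx0, PySem.List.pySetD_of_nonneg _ _ hy0,
      PySem.List.pyGetD_eq_getElem vis [] hx0 (by omega)]

theorem pvMark_shape (vis : List (List Int)) (M N : Nat) (hs : pvShape vis M N)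
    (x y : Int) (hx0 : 0 ≤ x) (hx : x < (M:Int)) (hy0 : 0 ≤ y) :
    pvShape (pvMark vis x y) M N := by
  obtain ⟨hlen, hrows⟩ := hs
  rw [pvMark_eq vis x y hx0 hy0 (by omega)]
  constructor
  · rw [List.length_set]; exact hlen
  · intro r hr
    rcases List.mem_or_eq_of_mem_set hr with hr | hr
    · exact hrows r hr
    · subst hr; rw [List.length_set]; exact hrows _ (List.getElem_mem _)

theorem pvGV_mark (vis : List (List Int)) (M N : Nat) (hs : pvShape vis M N)
    (x y a b : Int) (hx0 : 0 ≤ x) (hx : x < (M:Int)) (hy0 : 0 ≤ y) (hy : y < (N:Int))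
    (ha0 : 0 ≤ a) (ha : a < (M:Int)) (hb0 : 0 ≤ b) (hb : b < (N:Int)) :
    pvGV (pvMark vis x y) a b = if a = x ∧ b = y then 1 else pvGV vis a b := by
  obtain ⟨hlen, hrows⟩ := hs
  have hxN : x.toNat < vis.length := by omega
  have haN : a.toNat < vis.length := by omega
  have hrowx : (vis[x.toNat]).length = N := hrows _ (List.getElem_mem _)
  have hrowa : (vis[a.toNat]).length = N := hrows _ (List.getElem_mem _)
  rw [pvMark_eq vis x y hx0 hy0 hxN]
  unfold pvGV
  have houter : PySem.List.pyGetD (vis.set x.toNat (vis[x.toNat].set y.toNat 1)) a [] =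
      if a = x then vis[x.toNat].set y.toNat 1 else vis[a.toNat] := by
    rw [PySem.List.pyGetD_eq_getElem _ [] ha0 (by rw [List.length_set]; omega)]
    simp only [List.getElem_set]
    by_cases hax : a = x
    · subst hax; simp
    · have : x.toNat ≠ a.toNat := by omega
      simp [this, hax]
  by_cases hax : a = x
  · subst hax
    have houter2 : PySem.List.pyGetD (vis.set a.toNat (vis[a.toNat].set y.toNat 1)) a [] =
        vis[a.toNat].set y.toNat 1 := by rw [houter]; simp
    rw [houter2]
    simp only [true_and]
    rw [PySem.List.pyGetD_eq_getElem _ 0 hb0 (by rw [List.length_set]; omega)]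
    simp only [List.getElem_set]
    by_cases hby : b = y
    · subst hby; simp
    · have hne : y.toNat ≠ b.toNat := by omega
      simp only [hne, if_false]
      have : pvGV vis a b = vis[a.toNat][b.toNat] :=
        pvGV_eq_getElem vis a b ha0 haN hb0 (by omega)
      unfold pvGV at this
      simp [hby, this]
  · have houter2 : PySem.List.pyGetD (vis.set x.toNat (vis[x.toNat].set y.toNat 1)) a [] =
        vis[a.toNat] := by rw [houter]; simp [hax]
    rw [houter2]
    have hcond : ¬ (a = x ∧ b = y) := fun h => hax h.1
    simp only [hcond, if_false]
    have : pvGV vis a b = vis[a.toNat][b.toNat] :=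
      pvGV_eq_getElem vis a b ha0 haN hb0 (by omega)
    unfold pvGV at this
    rw [this]
    rw [PySem.List.pyGetD_eq_getElem _ 0 hb0 (by omega)]

theorem pvGV_replicate (M N : Nat) (a b : Int) :
    pvGV (List.replicate M (List.replicate N (0:Int))) a b = 0 := by
  unfold pvGV
  have h1 : PySem.List.pyGetD (List.replicate M (List.replicate N (0:Int))) a [] = []
      ∨ PySem.List.pyGetD (List.replicate M (List.replicate N (0:Int))) a [] = List.replicate N 0 := by
    by_cases hin : PySem.Raise.InRange (List.replicate M (List.replicate N (0:Int))).length a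
    · right
      exact List.eq_of_mem_replicate (PySem.List.pyGetD_mem _ _ hin)
    · left
      exact PySem.List.pyGetD_of_none _ _ _ ((PySem.List.pyGet?_eq_none_iff _ _).mpr hin)
  rcases h1 with h1 | h1 <;> rw [h1]
  · refine PySem.List.pyGetD_of_none _ _ _ ((PySem.List.pyGet?_eq_none_iff _ _).mpr ?_)
    intro hin
    simp only [PySem.Raise.InRange, List.length_nil] at hin
    omega
  · by_cases hin : PySem.Raise.InRange (List.replicate N (0:Int)).length b
    · exact List.eq_of_mem_replicate (PySem.List.pyGetD_mem _ _ hin)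
    · exact PySem.List.pyGetD_of_none _ _ _ ((PySem.List.pyGet?_eq_none_iff _ _).mpr hin)

-- ## counting unvisited cells (the termination measure)
def pvZeros (vis : List (List Int)) : Nat :=
  (vis.map (fun r => r.countP (fun v => v == 0))).sum

theorem pvCountP_set_zero : ∀ (row : List Int) (j : Nat) (hj : j < row.length), row[j]'hj = 0 →
    (row.set j 1).countP (fun v => v == 0) + 1 = row.countP (fun v => v == 0) := by
  intro row
  induction row with
  | nil => intro j h; simp at h
  | cons a t ih =>
    intro j hj ha
    cases j with
    | zero =>
      simp only [List.getElem_cons_zero] at ha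
      subst ha
      simp
    | succ j =>
      simp only [List.getElem_cons_succ] at ha
      have := ih j (by simp at hj; omega) ha
      simp only [List.set_cons_succ, List.countP_cons]
      omega

theorem pvSum_set : ∀ (l : List Nat) (i : Nat) (hi : i < l.length) (a : Nat),
    (l.set i a).sum + l[i]'hi = l.sum + a := by
  intro l
  induction l with
  | nil => intro i h; simp at h
  | cons hd t ih =>
    intro i hi a
    cases i with
    | zero => simp [List.sum_cons]; omega
    | succ i =>
      have := ih i (by simp at hi; omega) a
      simp only [List.set_cons_succ, List.sum_cons, List.getElem_cons_succ]
      omega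

theorem pvZeros_mark (vis : List (List Int)) (M N : Nat) (hs : pvShape vis M N)
    (x y : Int) (hx0 : 0 ≤ x) (hx : x < (M:Int)) (hy0 : 0 ≤ y) (hy : y < (N:Int))
    (h0 : pvGV vis x y = 0) :
    pvZeros (pvMark vis x y) + 1 = pvZeros vis := by
  obtain ⟨hlen, hrows⟩ := hs
  have hxN : x.toNat < vis.length := by omega
  have hrowx : (vis[x.toNat]).length = N := hrows _ (List.getElem_mem _)
  have h0' : vis[x.toNat][y.toNat]'(by omega) = 0 := by
    rw [← pvGV_eq_getElem vis x y hx0 hxN hy0 (by omega)]; exact h0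
  rw [pvMark_eq vis x y hx0 hy0 hxN]
  unfold pvZeros
  rw [List.map_set]
  have hsum := pvSum_set (vis.map (fun r => r.countP (fun v => v == 0))) x.toNat
    (by rw [List.length_map]; omega) ((vis[x.toNat].set y.toNat 1).countP (fun v => v == 0))
  have hget : (vis.map (fun r => r.countP (fun v => v == 0)))[x.toNat]'(by rw [List.length_map]; omega)
      = vis[x.toNat].countP (fun v => v == 0) := by
    simp
  rw [hget] at hsum
  have hcnt := pvCountP_set_zero (vis[x.toNat]) y.toNat (by omega) h0'
  omega

-- ## the list of grid cells and a cardinality bound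
def pvCellsL (m n : Int) : List (Int × Int) :=
  (PySem.List.pyRange 0 m 1).flatMap (fun x => (PySem.List.pyRange 0 n 1).map (fun y => (x,y)))

theorem mem_pvCellsL (m n : Int) (c : Int × Int) :
    c ∈ pvCellsL m n ↔ 0 ≤ c.1 ∧ c.1 < m ∧ 0 ≤ c.2 ∧ c.2 < n := by
  unfold pvCellsL
  rcases c with ⟨a, b⟩
  simp only [List.mem_flatMap, List.mem_map, PySem.List.mem_pyRange_one, Prod.mk.injEq]
  constructor
  · rintro ⟨x, hx, y, hy, rfl, rfl⟩
    exact ⟨hx.1, hx.2, hy.1, hy.2⟩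
  · rintro ⟨h1, h2, h3, h4⟩
    exact ⟨a, ⟨h1, h2⟩, b, ⟨h3, h4⟩, rfl, rfl⟩

theorem length_pvCellsL (m n : Int) : (pvCellsL m n).length = m.toNat * n.toNat := by
  unfold pvCellsL
  rw [List.length_flatMap]
  have : ∀ x ∈ PySem.List.pyRange 0 m 1,
      ((PySem.List.pyRange 0 n 1).map (fun y => (x,y))).length = n.toNat := by
    intro x _; rw [List.length_map, PySem.List.length_pyRange_one]; omega
  calc ((PySem.List.pyRange 0 m 1).map
          (fun x => ((PySem.List.pyRange 0 n 1).map (fun y => (x,y))).length)).sum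
      = ((PySem.List.pyRange 0 m 1).map (fun _ => n.toNat)).sum := by
        apply congrArg
        exact List.map_congr_left (fun x hx => this x hx)
    _ = m.toNat * n.toNat := by
        rw [List.map_const', List.sum_replicate, smul_eq_mul,
            PySem.List.length_pyRange_one]
        congr 1; omega

theorem pvCard_bound (m n : Int) (S : List (Int × Int)) (hnd : S.Nodup)
    (hsub : ∀ c ∈ S, 0 ≤ c.1 ∧ c.1 < m ∧ 0 ≤ c.2 ∧ c.2 < n) :
    S.length ≤ m.toNat * n.toNat := by
  rw [← length_pvCellsL m n]
  exact (List.subperm_of_subset hnd (fun c hc => (mem_pvCellsL m n c).mpr (hsub c hc))).length_le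
-- ## the Dijkstra loop invariant
def pvCellOf (e : Int × Int × Int) : Int × Int := (e.2.1, e.2.2)

def pvInR (m n : Int) (c : Int × Int) : Prop :=
  0 ≤ c.1 ∧ c.1 < m ∧ 0 ≤ c.2 ∧ c.2 < n

-- "cell c carries a record of value ≥ b (in the heap q or among the popped P)"
def pvRec (A : List (List Int)) (q P : List (Int × Int × Int)) (b : Int) (c : Int × Int) : Prop :=
  (∃ p ∈ P, pvCellOf p = c ∧ b ≤ p.1) ∨ (∃ e ∈ q, pvCellOf e = c ∧ b ≤ -e.1)

structure pvInvCore (A : List (List Int)) (m n : Int)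
    (q P : List (Int × Int × Int)) (vis : List (List Int)) : Prop where
  hm0 : 0 < m
  hn0 : 0 < n
  shape : pvShape vis m.toNat n.toNat
  rngQ : ∀ e ∈ q, pvInR m n (e.2.1, e.2.2)
  rngP : ∀ p ∈ P, pvInR m n (p.2.1, p.2.2)
  visIff : ∀ x y : Int, 0 ≤ x → x < m → 0 ≤ y → y < n →
    (pvGV vis x y ≠ 0 ↔ (x,y) ∈ (P.map pvCellOf ++ q.map pvCellOf))
  nodup : (P.map pvCellOf ++ q.map pvCellOf).Nodup
  sndQ : ∀ e ∈ q, pvReach A m n (-e.1) e.2.1 e.2.2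
  sndP : ∀ p ∈ P, pvReach A m n p.1 p.2.1 p.2.2
  ord : ∀ p ∈ P, ∀ e ∈ q, -e.1 ≤ p.1
  stQ : ∀ e ∈ q, e.2.1 = 0 → e.2.2 = 0 → -e.1 = pvGV A 0 0
  stP : ∀ p ∈ P, p.2.1 = 0 → p.2.2 = 0 → p.1 = pvGV A 0 0
  qpar : ∀ e ∈ q, (e.2.1 = 0 ∧ e.2.2 = 0) ∨
    ∃ p ∈ P, (e.2.1, e.2.2) ∈ pvNbrs p.2.1 p.2.2 ∧ -e.1 = min p.1 (pvGV A e.2.1 e.2.2)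
  valQ : ∀ e ∈ q, ∃ c, pvInR m n c ∧ -e.1 = pvGV A c.1 c.2
  valP : ∀ p ∈ P, ∃ c, pvInR m n c ∧ p.1 = pvGV A c.1 c.2
  startMem : ((0:Int),(0:Int)) ∈ (P.map pvCellOf ++ q.map pvCellOf)
  tgtP : ((m-1 : Int), (n-1 : Int)) ∉ P.map pvCellOf

def pvInv (A : List (List Int)) (m n : Int)
    (q P : List (Int × Int × Int)) (vis : List (List Int)) : Prop :=
  pvInvCore A m n q P vis ∧
  ∀ p ∈ P, ∀ c ∈ pvNbrs p.2.1 p.2.2, pvInR m n c →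
    pvRec A q P (min p.1 (pvGV A c.1 c.2)) c

-- ## the cut argument: any t-reachable cell has a live record of value ≥ t
theorem pvCut (A : List (List Int)) (m n : Int) (q P : List (Int × Int × Int))
    (vis : List (List Int)) (inv : pvInv A m n q P vis) {t x y : Int}
    (h : pvReach A m n t x y) :
    (∃ p ∈ P, pvCellOf p = (x,y) ∧ t ≤ p.1) ∨ (∃ e ∈ q, t ≤ -e.1) := by
  induction h with
  | start h0 =>
    rcases List.mem_append.mp inv.1.startMem with hmem | hmem
    · obtain ⟨p, hp, hcell⟩ := List.mem_map.mp hmem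
      unfold pvCellOf at hcell
      have h1 : p.2.1 = 0 := by simpa using congrArg Prod.fst hcell
      have h2 : p.2.2 = 0 := by simpa using congrArg Prod.snd hcell
      exact Or.inl ⟨p, hp, hcell, by rw [inv.1.stP p hp h1 h2]; exact h0⟩
    · obtain ⟨e, he, hcell⟩ := List.mem_map.mp hmem
      have h1 : e.2.1 = 0 := by simpa [pvCellOf] using congrArg Prod.fst hcell
      have h2 : e.2.2 = 0 := by simpa [pvCellOf] using congrArg Prod.snd hcell
      exact Or.inr ⟨e, he, by rw [inv.1.stQ e he h1 h2]; exact h0⟩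
  | @step x0 y0 x' y' hxy hadj hx0 hxm hy0 hyn hval ih =>
    rcases ih with ⟨p, hp, hcell, htp⟩ | hq
    · have hadj' : (x', y') ∈ pvNbrs p.2.1 p.2.2 := by
        have h1 : p.2.1 = x0 := by simpa [pvCellOf] using congrArg Prod.fst hcell
        have h2 : p.2.2 = y0 := by simpa [pvCellOf] using congrArg Prod.snd hcell
        rw [h1, h2]; exact hadj
      have hrec := inv.2 p hp (x', y') hadj' ⟨hx0, hxm, hy0, hyn⟩
      have hb : t ≤ min p.1 (pvGV A x' y') := le_min htp hval
      rcases hrec with ⟨p', hp', hcell', hbp⟩ | ⟨e, he, hcell', hbe⟩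
      · exact Or.inl ⟨p', hp', hcell', le_trans hb hbp⟩
      · exact Or.inr ⟨e, he, le_trans hb hbe⟩
    · exact Or.inr hq

-- the heap is nonempty while the target is reachable and unpopped
theorem pvQ_ne_nil (A : List (List Int)) (m n : Int) (q P : List (Int × Int × Int))
    (vis : List (List Int)) (inv : pvInv A m n q P vis) {t : Int}
    (h : pvReach A m n t (m-1) (n-1)) : q ≠ [] := by
  rcases pvCut A m n q P vis inv h with ⟨p, hp, hcell, _⟩ | ⟨e, he, _⟩
  · exact absurd (List.mem_map.mpr ⟨p, hp, hcell⟩) inv.1.tgtP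
  · intro hnil; rw [hnil] at he; exact absurd he (List.not_mem_nil)

-- ## transport of the invariant along a permutation of the heap list
theorem pvInv_permQ (A : List (List Int)) (m n : Int) (q q2 P : List (Int × Int × Int))
    (vis : List (List Int)) (hq : q.Perm q2) (inv : pvInv A m n q P vis) :
    pvInv A m n q2 P vis := by
  obtain ⟨core, nbr⟩ := inv
  have hmem : ∀ e, e ∈ q2 ↔ e ∈ q := fun e => (hq.mem_iff).symm
  have hperm2 : (P.map pvCellOf ++ q.map pvCellOf).Perm (P.map pvCellOf ++ q2.map pvCellOf) :=
    List.Perm.append_left _ (hq.map pvCellOf)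
  refine ⟨⟨core.hm0, core.hn0, core.shape, ?_, core.rngP, ?_, ?_, ?_, core.sndP, ?_, ?_,
    core.stP, ?_, ?_, core.valP, ?_, core.tgtP⟩, ?_⟩
  · exact fun e he => core.rngQ e ((hmem e).mp he)
  · intro x y hx0 hxm hy0 hyn
    rw [core.visIff x y hx0 hxm hy0 hyn]
    exact ⟨fun h => hperm2.mem_iff.mp h, fun h => hperm2.mem_iff.mpr h⟩
  · exact hperm2.nodup_iff.mp core.nodup
  · exact fun e he => core.sndQ e ((hmem e).mp he)
  · exact fun p hp e he => core.ord p hp e ((hmem e).mp he)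
  · exact fun e he => core.stQ e ((hmem e).mp he)
  · exact fun e he => core.qpar e ((hmem e).mp he)
  · exact fun e he => core.valQ e ((hmem e).mp he)
  · exact hperm2.mem_iff.mp core.startMem
  · intro p hp c hc hcr
    rcases nbr p hp c hc hcr with ⟨p', hp', h1, h2⟩ | ⟨e, he, h1, h2⟩
    · exact Or.inl ⟨p', hp', h1, h2⟩
    · exact Or.inr ⟨e, (hmem e).mpr he, h1, h2⟩
-- ## processing the four neighbours of a popped cell
def pvP0 (e : Int × Int × Int) : Int × Int × Int := (-e.1, e.2.1, e.2.2)

def pvStepF (A : List (List Int)) (m n : Int) (e : Int × Int × Int) :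
    (List (Int × Int × Int) × List (List Int)) → (Int × Int) → (List (Int × Int × Int) × List (List Int)) :=
  fun st c =>
    if 0 ≤ c.1 ∧ c.1 < m ∧ 0 ≤ c.2 ∧ c.2 < n ∧ pvGV st.2 c.1 c.2 = 0 then
      (st.1 ++ [(-(min (-e.1) (pvGV A c.1 c.2)), c.1, c.2)], pvMark st.2 c.1 c.2)
    else st

def pvMid (A : List (List Int)) (m n : Int) (e0 : Int × Int × Int)
    (P : List (Int × Int × Int)) (L : List (Int × Int))
    (q : List (Int × Int × Int)) (vis : List (List Int)) : Prop :=
  pvInvCore A m n q (P ++ [pvP0 e0]) vis ∧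
  (∀ p ∈ P ++ [pvP0 e0], (pvP0 e0).1 ≤ p.1) ∧
  (∀ p ∈ P ++ [pvP0 e0], ∀ c ∈ pvNbrs p.2.1 p.2.2, pvInR m n c → (p = pvP0 e0 → c ∉ L) →
    pvRec A q (P ++ [pvP0 e0]) (min p.1 (pvGV A c.1 c.2)) c)

theorem pvRec_extQ (A : List (List Int)) (q P : List (Int × Int × Int)) (l : List (Int × Int × Int))
    (b : Int) (c : Int × Int) (h : pvRec A q P b c) : pvRec A (q ++ l) P b c := by
  rcases h with ⟨p, hp, h1, h2⟩ | ⟨e, he, h1, h2⟩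
  · exact Or.inl ⟨p, hp, h1, h2⟩
  · exact Or.inr ⟨e, List.mem_append_left _ he, h1, h2⟩

theorem pvMid_step (A : List (List Int)) (m n : Int) (e0 : Int × Int × Int)
    (P : List (Int × Int × Int)) (c : Int × Int) (L' : List (Int × Int))
    (q : List (Int × Int × Int)) (vis : List (List Int))
    (hc : c ∈ pvNbrs e0.2.1 e0.2.2)
    (hmid : pvMid A m n e0 P (c :: L') q vis) :
    pvMid A m n e0 P L' (pvStepF A m n e0 (q, vis) c).1 (pvStepF A m n e0 (q, vis) c).2 ∧
    pvZeros (pvStepF A m n e0 (q, vis) c).2 + (pvStepF A m n e0 (q, vis) c).1.length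
      = pvZeros vis + q.length := by
  obtain ⟨core, hord, hnbr⟩ := hmid
  by_cases hcond : 0 ≤ c.1 ∧ c.1 < m ∧ 0 ≤ c.2 ∧ c.2 < n ∧ pvGV vis c.1 c.2 = 0
  case neg =>
    -- rejected: state unchanged, and if c was in range it already has a record
    have hstep : pvStepF A m n e0 (q, vis) c = (q, vis) := by
      unfold pvStepF; rw [if_neg hcond]
    rw [hstep]
    refine ⟨⟨core, hord, ?_⟩, rfl⟩
    intro p hp c' hc' hin hnotL
    by_cases hpe : p = pvP0 e0
    · by_cases hcc : c' = c
      · -- c in range (hin) but rejected, so it is visited: use its existing record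
        subst hcc
        have hvis : pvGV vis c'.1 c'.2 ≠ 0 := by
          intro h0; exact hcond ⟨hin.1, hin.2.1, hin.2.2.1, hin.2.2.2, h0⟩
        have hmem := (core.visIff c'.1 c'.2 hin.1 hin.2.1 hin.2.2.1 hin.2.2.2).mp
          (by simpa using hvis)
        rcases List.mem_append.mp hmem with hm | hm
        · obtain ⟨p', hp', hcell⟩ := List.mem_map.mp hm
          refine Or.inl ⟨p', hp', hcell, ?_⟩
          exact le_trans (min_le_left _ _) (by rw [hpe]; exact hord p' hp')
        · obtain ⟨e, he, hcell⟩ := List.mem_map.mp hm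
          refine Or.inr ⟨e, he, hcell, ?_⟩
          have he1 : e.2.1 = c'.1 := by simpa [pvCellOf] using congrArg Prod.fst hcell
          have he2 : e.2.2 = c'.2 := by simpa [pvCellOf] using congrArg Prod.snd hcell
          rcases core.qpar e he with ⟨hz1, hz2⟩ | ⟨p'', hp'', _, hval⟩
          · have : -e.1 = pvGV A 0 0 := core.stQ e he hz1 hz2
            rw [this]
            have : pvGV A c'.1 c'.2 = pvGV A 0 0 := by rw [← he1, ← he2, hz1, hz2]
            rw [hpe]
            calc min (pvP0 e0).1 (pvGV A c'.1 c'.2) ≤ pvGV A c'.1 c'.2 := min_le_right _ _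
              _ = pvGV A 0 0 := this
          · rw [hval, he1, he2, hpe]
            exact min_le_min (hord p'' hp'') (le_refl _)
      · exact hnbr p hp c' hc' hin (fun _ => by
          intro hmem
          rcases List.mem_cons.mp hmem with h | h
          · exact hcc h
          · exact hnotL hpe h)
    · exact hnbr p hp c' hc' hin (fun h => absurd h hpe)
  case pos =>
    have hc10 : 0 ≤ c.1 := hcond.1
    have hc1m : c.1 < m := hcond.2.1
    have hc20 : 0 ≤ c.2 := hcond.2.2.1
    have hc2n : c.2 < n := hcond.2.2.2.1
    have hvis0 : pvGV vis c.1 c.2 = 0 := hcond.2.2.2.2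
    have hstep : pvStepF A m n e0 (q, vis) c =
        (q ++ [(-(min (-e0.1) (pvGV A c.1 c.2)), c.1, c.2)], pvMark vis c.1 c.2) := by
      unfold pvStepF; rw [if_pos hcond]
    rw [hstep]
    set enew : Int × Int × Int := (-(min (-e0.1) (pvGV A c.1 c.2)), c.1, c.2) with henew
    have hval_enew : -enew.1 = min (pvP0 e0).1 (pvGV A c.1 c.2) := by simp [henew, pvP0]
    have hcell_enew : pvCellOf enew = c := by simp [henew, pvCellOf]
    have hp0mem : pvP0 e0 ∈ P ++ [pvP0 e0] := List.mem_append_right _ (List.mem_singleton.mpr rfl)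
    -- c is fresh: not among the recorded cells
    have hfresh : c ∉ ((P ++ [pvP0 e0]).map pvCellOf ++ q.map pvCellOf) := by
      intro hmem
      have := (core.visIff c.1 c.2 hc10 hc1m hc20 hc2n).mpr hmem
      exact this hvis0
    have hshape := core.shape
    have hreach_new : pvReach A m n (-enew.1) enew.2.1 enew.2.2 := by
      have h1 : pvReach A m n (pvP0 e0).1 (pvP0 e0).2.1 (pvP0 e0).2.2 := core.sndP _ hp0mem
      have h2 : pvReach A m n (min (pvP0 e0).1 (pvGV A c.1 c.2)) (pvP0 e0).2.1 (pvP0 e0).2.2 :=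
        pvReach_mono (min_le_left _ _) h1
      have h3 := pvReach.step h2 (by simpa [pvP0] using hc) hc10 hc1m hc20 hc2n
        (min_le_right _ _)
      rw [hval_enew]
      exact h3
    have hnotstart : ¬(c = ((0:Int),(0:Int))) := by
      intro hc0
      apply hfresh
      rw [hc0]
      exact core.startMem
    refine ⟨⟨⟨core.hm0, core.hn0, ?_, ?_, core.rngP, ?_, ?_, ?_, core.sndP, ?_, ?_,
      core.stP, ?_, ?_, core.valP, ?_, core.tgtP⟩, hord, ?_⟩, ?_⟩
    · -- shape
      exact pvMark_shape vis _ _ hshape c.1 c.2 hc10 (by omega) hc20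
    · -- rngQ
      intro e he
      rcases List.mem_append.mp he with he | he
      · exact core.rngQ e he
      · rw [List.mem_singleton.mp he]
        exact ⟨hc10, hc1m, hc20, hc2n⟩
    · -- visIff
      intro x y hx0 hxm hy0 hyn
      have := pvGV_mark vis m.toNat n.toNat hshape c.1 c.2 x y hc10 (by omega) hc20 (by omega)
        hx0 (by omega) hy0 (by omega)
      rw [this]
      by_cases hxy : x = c.1 ∧ y = c.2
      · rw [if_pos hxy]
        constructor
        · intro _
          apply List.mem_append_right
          rw [List.map_append]
          apply List.mem_append_right
          have hxyc : (x, y) = pvCellOf enew := by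
            rw [hcell_enew]
            obtain ⟨h1, h2⟩ := hxy
            subst h1; subst h2
            rfl
          rw [hxyc]
          exact List.mem_map_of_mem (List.mem_singleton.mpr rfl)
        · intro _; norm_num
      · rw [if_neg hxy]
        rw [core.visIff x y (by omega) (by omega) (by omega) (by omega)]
        constructor
        · intro hmem
          rcases List.mem_append.mp hmem with hm | hm
          · exact List.mem_append_left _ hm
          · apply List.mem_append_right
            rw [List.map_append]
            exact List.mem_append_left _ hm
        · intro hmem
          rcases List.mem_append.mp hmem with hm | hm
          · exact List.mem_append_left _ hm
          · rw [List.map_append] at hm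
            rcases List.mem_append.mp hm with hm | hm
            · exact List.mem_append_right _ hm
            · exfalso
              simp only [List.map_cons, List.map_nil, List.mem_singleton] at hm
              rw [hcell_enew] at hm
              exact hxy ⟨by simpa using congrArg Prod.fst hm, by simpa using congrArg Prod.snd hm⟩
    · -- nodup
      have hassoc : ((P ++ [pvP0 e0]).map pvCellOf ++ (q ++ [enew]).map pvCellOf) =
          (((P ++ [pvP0 e0]).map pvCellOf ++ q.map pvCellOf) ++ [pvCellOf enew]) := by
        simp only [List.map_append, List.map_cons, List.map_nil, List.append_assoc]
      rw [hassoc]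
      rw [List.nodup_append]
      refine ⟨core.nodup, List.nodup_singleton _, ?_⟩
      intro a ha b hb
      have hb' : b = pvCellOf enew := by simpa using hb
      rw [hb', hcell_enew]
      intro hac
      rw [hac] at ha
      exact hfresh ha
    · -- sndQ
      intro e he
      rcases List.mem_append.mp he with he | he
      · exact core.sndQ e he
      · rw [List.mem_singleton.mp he]; exact hreach_new
    · -- ord
      intro p hp e he
      rcases List.mem_append.mp he with he | he
      · exact core.ord p hp e he
      · rw [List.mem_singleton.mp he, hval_enew]
        exact le_trans (min_le_left _ _) (hord p hp)
    · -- stQ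
      intro e he h1 h2
      rcases List.mem_append.mp he with he | he
      · exact core.stQ e he h1 h2
      · exfalso
        have heq := List.mem_singleton.mp he
        apply hnotstart
        rw [← hcell_enew]
        unfold pvCellOf
        rw [← heq, h1, h2]
    · -- qpar
      intro e he
      rcases List.mem_append.mp he with he | he
      · rcases core.qpar e he with h | ⟨p, hp, h1, h2⟩
        · exact Or.inl h
        · exact Or.inr ⟨p, hp, h1, h2⟩
      · rw [List.mem_singleton.mp he]
        refine Or.inr ⟨pvP0 e0, hp0mem, ?_, ?_⟩
        · simpa [henew, pvP0] using hc
        · rw [← hval_enew]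
    · -- valQ
      intro e he
      rcases List.mem_append.mp he with he | he
      · exact core.valQ e he
      · rw [List.mem_singleton.mp he]
        rw [hval_enew]
        rcases min_cases ((pvP0 e0).1) (pvGV A c.1 c.2) with ⟨hmin, _⟩ | ⟨hmin, _⟩
        · obtain ⟨c', hc', hv⟩ := core.valP _ hp0mem
          exact ⟨c', hc', by rw [hmin]; exact hv⟩
        · exact ⟨c, ⟨hc10, hc1m, hc20, hc2n⟩, by rw [hmin]⟩
    · -- startMem
      rcases List.mem_append.mp core.startMem with hm | hm
      · exact List.mem_append_left _ hm
      · apply List.mem_append_right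
        rw [List.map_append]
        exact List.mem_append_left _ hm
    · -- the nbr clause
      intro p hp c' hc' hin hnotL
      by_cases hpe : p = pvP0 e0
      · by_cases hcc : c' = c
        · subst hcc
          refine Or.inr ⟨enew, List.mem_append_right _ (List.mem_singleton.mpr rfl),
            hcell_enew, ?_⟩
          rw [hval_enew, hpe]
        · have hold := hnbr p hp c' hc' hin (fun _ => by
            intro hmem
            rcases List.mem_cons.mp hmem with h | h
            · exact hcc h
            · exact hnotL hpe h)
          exact pvRec_extQ A q _ _ _ _ hold
      · have hold := hnbr p hp c' hc' hin (fun h => absurd h hpe)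
        exact pvRec_extQ A q _ _ _ _ hold
    · -- the measure
      have hz := pvZeros_mark vis m.toNat n.toNat hshape c.1 c.2 hc10 (by omega) hc20 (by omega)
        hvis0
      simp only [List.length_append, List.length_singleton]
      omega

theorem pvMid_fold (A : List (List Int)) (m n : Int) (e0 : Int × Int × Int)
    (P : List (Int × Int × Int)) :
    ∀ (L : List (Int × Int)) (q : List (Int × Int × Int)) (vis : List (List Int)),
    (∀ c ∈ L, c ∈ pvNbrs e0.2.1 e0.2.2) →
    pvMid A m n e0 P L q vis →
    pvMid A m n e0 P [] (L.foldl (pvStepF A m n e0) (q, vis)).1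
      (L.foldl (pvStepF A m n e0) (q, vis)).2 ∧
    pvZeros (L.foldl (pvStepF A m n e0) (q, vis)).2
      + (L.foldl (pvStepF A m n e0) (q, vis)).1.length = pvZeros vis + q.length := by
  intro L
  induction L with
  | nil => intro q vis _ hmid; exact ⟨hmid, rfl⟩
  | cons c L' ih =>
    intro q vis hsub hmid
    have hstep := pvMid_step A m n e0 P c L' q vis (hsub c (List.mem_cons_self ..)) hmid
    have := ih (pvStepF A m n e0 (q, vis) c).1 (pvStepF A m n e0 (q, vis) c).2
      (fun d hd => hsub d (List.mem_cons_of_mem _ hd)) hstep.1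
    rw [Prod.mk.eta] at this
    simp only [List.foldl_cons]
    refine ⟨this.1, ?_⟩
    have h2 := this.2
    have h3 := hstep.2
    omega
-- ## popping the minimum re-establishes the invariant for the neighbour fold
theorem pvMid_init (A : List (List Int)) (m n : Int) (e0 : Int × Int × Int)
    (q' P : List (Int × Int × Int)) (vis : List (List Int))
    (inv : pvInv A m n (e0 :: q') P vis)
    (hmin : ∀ x ∈ e0 :: q', pvTripLe e0 x = true)
    (hnt : ¬(e0.2.1 = m - 1 ∧ e0.2.2 = n - 1)) :
    pvMid A m n e0 P (pvNbrs e0.2.1 e0.2.2) q' vis := by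
  obtain ⟨core, nbr⟩ := inv
  have hcellp0 : pvCellOf (pvP0 e0) = pvCellOf e0 := rfl
  have hcells : (P ++ [pvP0 e0]).map pvCellOf ++ q'.map pvCellOf
      = P.map pvCellOf ++ (e0 :: q').map pvCellOf := by
    simp only [List.map_append, List.map_cons, List.map_nil, List.append_assoc, hcellp0]
    rfl
  have hp0v : (pvP0 e0).1 = -e0.1 := rfl
  have hordP : ∀ p ∈ P ++ [pvP0 e0], (pvP0 e0).1 ≤ p.1 := by
    intro p hp
    rcases List.mem_append.mp hp with hp | hp
    · rw [hp0v]; exact core.ord p hp e0 (List.mem_cons_self ..)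
    · rw [List.mem_singleton.mp hp]
  refine ⟨⟨core.hm0, core.hn0, core.shape, ?_, ?_, ?_, ?_, ?_, ?_, ?_, ?_, ?_, ?_, ?_, ?_,
    ?_, ?_⟩, hordP, ?_⟩
  · exact fun e he => core.rngQ e (List.mem_cons_of_mem _ he)
  · -- rngP
    intro p hp
    rcases List.mem_append.mp hp with hp | hp
    · exact core.rngP p hp
    · rw [List.mem_singleton.mp hp]
      exact core.rngQ e0 (List.mem_cons_self ..)
  · -- visIff
    intro x y hx0 hxm hy0 hyn
    rw [hcells]
    exact core.visIff x y hx0 hxm hy0 hyn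
  · rw [hcells]; exact core.nodup
  · exact fun e he => core.sndQ e (List.mem_cons_of_mem _ he)
  · -- sndP
    intro p hp
    rcases List.mem_append.mp hp with hp | hp
    · exact core.sndP p hp
    · rw [List.mem_singleton.mp hp]
      exact core.sndQ e0 (List.mem_cons_self ..)
  · -- ord
    intro p hp e he
    rcases List.mem_append.mp hp with hp | hp
    · exact core.ord p hp e (List.mem_cons_of_mem _ he)
    · rw [List.mem_singleton.mp hp, hp0v]
      have := pvTripLe_fst (hmin e (List.mem_cons_of_mem _ he))
      omega
  · exact fun e he => core.stQ e (List.mem_cons_of_mem _ he)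
  · -- stP
    intro p hp
    rcases List.mem_append.mp hp with hp | hp
    · exact core.stP p hp
    · rw [List.mem_singleton.mp hp]
      exact core.stQ e0 (List.mem_cons_self ..)
  · -- qpar
    intro e he
    rcases core.qpar e (List.mem_cons_of_mem _ he) with h | ⟨p, hp, h1, h2⟩
    · exact Or.inl h
    · exact Or.inr ⟨p, List.mem_append_left _ hp, h1, h2⟩
  · exact fun e he => core.valQ e (List.mem_cons_of_mem _ he)
  · -- valP
    intro p hp
    rcases List.mem_append.mp hp with hp | hp
    · exact core.valP p hp
    · rw [List.mem_singleton.mp hp]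
      exact core.valQ e0 (List.mem_cons_self ..)
  · rw [hcells]; exact core.startMem
  · -- tgtP
    intro hmem
    rw [List.map_append] at hmem
    rcases List.mem_append.mp hmem with hm | hm
    · exact core.tgtP hm
    · simp only [List.map_cons, List.map_nil, List.mem_singleton] at hm
      apply hnt
      constructor
      · simpa [pvCellOf, pvP0] using (congrArg Prod.fst hm).symm
      · simpa [pvCellOf, pvP0] using (congrArg Prod.snd hm).symm
  · -- the nbr clause
    intro p hp c hc hin hnotL
    rcases List.mem_append.mp hp with hp | hp
    · -- old popped cell: transform its record
      rcases nbr p hp c hc hin with ⟨p', hp', h1, h2⟩ | ⟨e, he, h1, h2⟩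
      · exact Or.inl ⟨p', List.mem_append_left _ hp', h1, h2⟩
      · rcases List.mem_cons.mp he with he | he
        · refine Or.inl ⟨pvP0 e0, List.mem_append_right _ (List.mem_singleton.mpr rfl), ?_, ?_⟩
          · rw [hcellp0, ← he]; exact h1
          · rw [hp0v, ← he]; exact h2
        · exact Or.inr ⟨e, he, h1, h2⟩
    · -- the newly popped cell: its neighbours are all still unprocessed
      exfalso
      have hpe := List.mem_singleton.mp hp
      have := hnotL hpe
      rw [hpe] at hc
      exact this hc

def pvIsAns (A : List (List Int)) (m n r : Int) : Prop :=
  pvReach A m n r (m-1) (n-1) ∧ (∀ t, pvReach A m n t (m-1) (n-1) → t ≤ r) ∧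
  ∃ c, pvInR m n c ∧ r = pvGV A c.1 c.2

-- ## the heap loop computes the optimal bottleneck value
theorem pvLoopA_correct (A : List (List Int)) (m n : Int) (t0 : Int)
    (ht0 : pvReach A m n t0 (m-1) (n-1)) :
    ∀ (fuel : Nat) (q P : List (Int × Int × Int)) (vis : List (List Int)),
    pvInv A m n q P vis → pvZeros vis + q.length ≤ fuel →
    pvIsAns A m n (pvLoopA A m n fuel q vis) := by
  intro fuel
  induction fuel with
  | zero =>
    intro q P vis inv hfuel
    exact absurd (List.length_eq_zero_iff.mp (by omega)) (pvQ_ne_nil A m n q P vis inv ht0)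
  | succ fuel ih =>
    intro q P vis inv hfuel
    have hne := pvQ_ne_nil A m n q P vis inv ht0
    cases hq : pvPopMin q with
    | none => exact absurd ((pvPopMin_eq_none_iff q).mp hq) hne
    | some pr =>
      obtain ⟨e0, q'⟩ := pr
      obtain ⟨hperm, hmin⟩ := pvPopMin_spec q e0 q' hq
      have inv2 := pvInv_permQ A m n q (e0 :: q') P vis hperm inv
      have hlen : q.length = q'.length + 1 := by
        rw [hperm.length_eq]; rfl
      by_cases htgt : e0.2.1 = m - 1 ∧ e0.2.2 = n - 1
      · have hres : pvLoopA A m n (fuel+1) q vis = -e0.1 := by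
          simp only [pvLoopA, hq]
          rw [if_pos htgt]
        rw [hres]
        refine ⟨?_, ?_, ?_⟩
        · have := inv2.1.sndQ e0 (List.mem_cons_self ..)
          rw [htgt.1, htgt.2] at this
          exact this
        · intro t ht
          rcases pvCut A m n q P vis inv ht with ⟨p, hp, hcell, _⟩ | ⟨e, he, hte⟩
          · exact absurd (List.mem_map.mpr ⟨p, hp, hcell⟩) inv.1.tgtP
          · have := pvTripLe_fst (hmin e he)
            omega
        · exact inv2.1.valQ e0 (List.mem_cons_self ..)
      · have hmin' : ∀ x ∈ e0 :: q', pvTripLe e0 x = true := fun x hx => hmin x (hperm.mem_iff.mpr hx)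
        have mid := pvMid_init A m n e0 q' P vis inv2 hmin' htgt
        have fold := pvMid_fold A m n e0 P (pvNbrs e0.2.1 e0.2.2) q' vis (fun c hc => hc) mid
        have inv3 : pvInv A m n ((pvNbrs e0.2.1 e0.2.2).foldl (pvStepF A m n e0) (q', vis)).1
            (P ++ [pvP0 e0]) ((pvNbrs e0.2.1 e0.2.2).foldl (pvStepF A m n e0) (q', vis)).2 := by
          refine ⟨fold.1.1, ?_⟩
          intro p hp c hc hin
          exact fold.1.2.2 p hp c hc hin (fun _ => by simp)
        have hres : pvLoopA A m n (fuel+1) q vis =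
            pvLoopA A m n fuel ((pvNbrs e0.2.1 e0.2.2).foldl (pvStepF A m n e0) (q', vis)).1
              ((pvNbrs e0.2.1 e0.2.2).foldl (pvStepF A m n e0) (q', vis)).2 := by
          simp only [pvLoopA, hq]
          rw [if_neg htgt]
          rfl
        rw [hres]
        exact ih _ (P ++ [pvP0 e0]) _ inv3 (by omega)
-- ## the DFS flood fill of B
def pvDStepF (A : List (List Int)) (m n t : Int) :
    (List (Int × Int) × PySem.Set (Int × Int)) → (Int × Int) → (List (Int × Int) × PySem.Set (Int × Int)) :=
  fun st d =>
    if 0 ≤ d.1 ∧ d.1 < m ∧ 0 ≤ d.2 ∧ d.2 < n ∧ d ∉ st.2 ∧ t ≤ pvGV A d.1 d.2 then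
      (d :: st.1, PySem.Set.add st.2 d)
    else st

structure pvDCore (A : List (List Int)) (m n t : Int)
    (stack seen D : List (Int × Int)) : Prop where
  rng : ∀ c ∈ seen, pvInR m n c
  ssub : ∀ c : Int × Int, c ∈ seen ↔ c ∈ D ++ stack
  nd : (D ++ stack).Nodup
  ndseen : seen.Nodup
  snd : ∀ c ∈ seen, pvReach A m n t c.1 c.2
  startm : ((0:Int),(0:Int)) ∈ seen
  tgtD : ((m-1 : Int), (n-1 : Int)) ∉ D

def pvDInv (A : List (List Int)) (m n t : Int) (stack seen D : List (Int × Int)) : Prop :=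
  pvDCore A m n t stack seen D ∧
  ∀ c ∈ D, ∀ d ∈ pvNbrs c.1 c.2, pvInR m n d → t ≤ pvGV A d.1 d.2 → d ∈ seen

def pvDMid (A : List (List Int)) (m n t : Int) (c0 : Int × Int)
    (D : List (Int × Int)) (L : List (Int × Int)) (stack seen : List (Int × Int)) : Prop :=
  pvDCore A m n t stack seen (D ++ [c0]) ∧
  ∀ c ∈ D ++ [c0], ∀ d ∈ pvNbrs c.1 c.2, pvInR m n d → t ≤ pvGV A d.1 d.2 →
    (c = c0 → d ∉ L) → d ∈ seen

theorem pvDMid_step (A : List (List Int)) (m n t : Int) (c0 : Int × Int)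
    (D : List (Int × Int)) (d : Int × Int) (L' : List (Int × Int))
    (stack seen : List (Int × Int))
    (hd : d ∈ pvNbrs c0.1 c0.2)
    (hmid : pvDMid A m n t c0 D (d :: L') stack seen) :
    pvDMid A m n t c0 D L' (pvDStepF A m n t (stack, seen) d).1
      (pvDStepF A m n t (stack, seen) d).2 ∧
    m.toNat * n.toNat - (pvDStepF A m n t (stack, seen) d).2.length
      + (pvDStepF A m n t (stack, seen) d).1.length
      = m.toNat * n.toNat - seen.length + stack.length := by
  obtain ⟨core, hcl⟩ := hmid
  by_cases hcond : 0 ≤ d.1 ∧ d.1 < m ∧ 0 ≤ d.2 ∧ d.2 < n ∧ d ∉ seen ∧ t ≤ pvGV A d.1 d.2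
  case neg =>
    have hstep : pvDStepF A m n t (stack, seen) d = (stack, seen) := by
      unfold pvDStepF; rw [if_neg hcond]
    rw [hstep]
    refine ⟨⟨core, ?_⟩, rfl⟩
    intro c hc d' hd' hin hval hnotL
    by_cases hcc : c = c0
    · by_cases hdd : d' = d
      · subst hdd
        by_cases hmem : d' ∈ seen
        · exact hmem
        · exact absurd ⟨hin.1, hin.2.1, hin.2.2.1, hin.2.2.2, hmem, hval⟩ hcond
      · exact hcl c hc d' hd' hin hval (fun _ => by
          intro hmem
          rcases List.mem_cons.mp hmem with h | h
          · exact hdd h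
          · exact hnotL hcc h)
    · exact hcl c hc d' hd' hin hval (fun h => absurd h hcc)
  case pos =>
    have hin : pvInR m n d := ⟨hcond.1, hcond.2.1, hcond.2.2.1, hcond.2.2.2.1⟩
    have hnotseen : d ∉ seen := hcond.2.2.2.2.1
    have hval : t ≤ pvGV A d.1 d.2 := hcond.2.2.2.2.2
    have hstep : pvDStepF A m n t (stack, seen) d = (d :: stack, seen ++ [d]) := by
      unfold pvDStepF
      rw [if_pos hcond]
      rw [PySem.Set.add_of_not_mem hnotseen]
    rw [hstep]
    have hc0seen : c0 ∈ seen :=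
      (core.ssub c0).mpr (List.mem_append_left _ (List.mem_append_right _ (List.mem_singleton.mpr rfl)))
    have hreach_d : pvReach A m n t d.1 d.2 :=
      pvReach.step (core.snd c0 hc0seen) hd hin.1 hin.2.1 hin.2.2.1 hin.2.2.2 hval
    have hfreshDS : d ∉ (D ++ [c0]) ++ stack := fun hmem => hnotseen ((core.ssub d).mpr hmem)
    have hndseen' : (seen ++ [d]).Nodup := by
      rw [List.nodup_append]
      exact ⟨core.ndseen, List.nodup_singleton _, by
        intro a ha b hb
        have : b = d := by simpa using hb
        rw [this]
        intro hab; rw [hab] at ha; exact hnotseen ha⟩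
    have hrng' : ∀ c ∈ seen ++ [d], pvInR m n c := by
      intro c hc
      rcases List.mem_append.mp hc with hc | hc
      · exact core.rng c hc
      · rw [List.mem_singleton.mp hc]; exact hin
    refine ⟨⟨⟨hrng', ?_, ?_, hndseen', ?_, ?_, core.tgtD⟩, ?_⟩, ?_⟩
    · -- ssub
      intro c
      constructor
      · intro hc
        rcases List.mem_append.mp hc with hc | hc
        · rcases List.mem_append.mp ((core.ssub c).mp hc) with h | h
          · exact List.mem_append_left _ h
          · exact List.mem_append_right _ (List.mem_cons_of_mem _ h)
        · rw [List.mem_singleton.mp hc]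
          exact List.mem_append_right _ (List.mem_cons_self ..)
      · intro hc
        rcases List.mem_append.mp hc with hc | hc
        · exact List.mem_append_left _ ((core.ssub c).mpr (List.mem_append_left _ hc))
        · rcases List.mem_cons.mp hc with hc | hc
          · rw [hc]; exact List.mem_append_right _ (List.mem_singleton.mpr rfl)
          · exact List.mem_append_left _ ((core.ssub c).mpr (List.mem_append_right _ hc))
    · -- nd
      have hperm : ((D ++ [c0]) ++ d :: stack).Perm (d :: ((D ++ [c0]) ++ stack)) :=
        List.perm_middle
      rw [hperm.nodup_iff]
      exact List.Nodup.cons hfreshDS core.nd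
    · -- snd
      intro c hc
      rcases List.mem_append.mp hc with hc | hc
      · exact core.snd c hc
      · rw [List.mem_singleton.mp hc]; exact hreach_d
    · -- startm
      exact List.mem_append_left _ core.startm
    · -- closed clause
      intro c hc d' hd' hin' hval' hnotL
      by_cases hdd : d' = d
      · rw [hdd]; exact List.mem_append_right _ (List.mem_singleton.mpr rfl)
      · apply List.mem_append_left
        by_cases hcc : c = c0
        · exact hcl c hc d' hd' hin' hval' (fun _ => by
            intro hmem
            rcases List.mem_cons.mp hmem with h | h
            · exact hdd h
            · exact hnotL hcc h)
        · exact hcl c hc d' hd' hin' hval' (fun h => absurd h hcc)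
    · -- measure
      have hbound : (seen ++ [d]).length ≤ m.toNat * n.toNat :=
        pvCard_bound m n (seen ++ [d]) hndseen' hrng'
      simp only [List.length_append, List.length_cons, List.length_nil] at hbound ⊢
      omega

theorem pvDMid_fold (A : List (List Int)) (m n t : Int) (c0 : Int × Int)
    (D : List (Int × Int)) :
    ∀ (L : List (Int × Int)) (stack seen : List (Int × Int)),
    (∀ d ∈ L, d ∈ pvNbrs c0.1 c0.2) →
    pvDMid A m n t c0 D L stack seen →
    pvDMid A m n t c0 D [] (L.foldl (pvDStepF A m n t) (stack, seen)).1
      (L.foldl (pvDStepF A m n t) (stack, seen)).2 ∧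
    m.toNat * n.toNat - (L.foldl (pvDStepF A m n t) (stack, seen)).2.length
      + (L.foldl (pvDStepF A m n t) (stack, seen)).1.length
      = m.toNat * n.toNat - seen.length + stack.length := by
  intro L
  induction L with
  | nil => intro stack seen _ hmid; exact ⟨hmid, rfl⟩
  | cons d L' ih =>
    intro stack seen hsub hmid
    have hstep := pvDMid_step A m n t c0 D d L' stack seen (hsub d (List.mem_cons_self ..)) hmid
    have := ih (pvDStepF A m n t (stack, seen) d).1 (pvDStepF A m n t (stack, seen) d).2
      (fun d' hd' => hsub d' (List.mem_cons_of_mem _ hd')) hstep.1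
    rw [Prod.mk.eta] at this
    simp only [List.foldl_cons]
    exact ⟨this.1, by omega⟩

-- a closed seen set contains every reachable cell
theorem pvDClosed_reach (A : List (List Int)) (m n t : Int) (seen D : List (Int × Int))
    (hseenD : ∀ c ∈ seen, c ∈ D)
    (hclosed : ∀ c ∈ D, ∀ d ∈ pvNbrs c.1 c.2, pvInR m n d → t ≤ pvGV A d.1 d.2 → d ∈ seen)
    (hstart : ((0:Int),(0:Int)) ∈ seen) :
    ∀ x y : Int, pvReach A m n t x y → (x, y) ∈ seen := by
  intro x y h
  induction h with
  | start h0 => exact hstart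
  | @step x0 y0 x' y' hxy hadj hx0 hxm hy0 hyn hval ih =>
    exact hclosed (x0, y0) (hseenD _ ih) (x', y') hadj ⟨hx0, hxm, hy0, hyn⟩ hval

theorem pvDFS_iff (A : List (List Int)) (m n t : Int) :
    ∀ (fuel : Nat) (stack seen D : List (Int × Int)),
    pvDInv A m n t stack seen D →
    m.toNat * n.toNat - seen.length + stack.length ≤ fuel →
    (pvReachLoop A m n t fuel stack seen = true ↔ pvReach A m n t (m-1) (n-1)) := by
  intro fuel
  induction fuel with
  | zero =>
    intro stack seen D inv hfuel
    have hstack : stack = [] := List.length_eq_zero_iff.mp (by omega)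
    subst hstack
    simp only [pvReachLoop, Bool.false_eq_true, false_iff]
    intro hreach
    have hseenD : ∀ c ∈ seen, c ∈ D := by
      intro c hc
      have := (inv.1.ssub c).mp hc
      simpa using this
    have := pvDClosed_reach A m n t seen D hseenD inv.2 inv.1.startm (m-1) (n-1) hreach
    exact inv.1.tgtD (hseenD _ this)
  | succ fuel ih =>
    intro stack seen D inv hfuel
    cases stack with
    | nil =>
      simp only [pvReachLoop, Bool.false_eq_true, false_iff]
      intro hreach
      have hseenD : ∀ c ∈ seen, c ∈ D := by
        intro c hc
        have := (inv.1.ssub c).mp hc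
        simpa using this
      have := pvDClosed_reach A m n t seen D hseenD inv.2 inv.1.startm (m-1) (n-1) hreach
      exact inv.1.tgtD (hseenD _ this)
    | cons c0 stack' =>
      by_cases htgt : c0.1 = m - 1 ∧ c0.2 = n - 1
      · have hres : pvReachLoop A m n t (fuel+1) (c0 :: stack') seen = true := by
          simp only [pvReachLoop]
          rw [if_pos htgt]
        rw [hres]
        simp only [true_iff]
        have hc0 : c0 ∈ seen :=
          (inv.1.ssub c0).mpr (List.mem_append_right _ (List.mem_cons_self ..))
        have := inv.1.snd c0 hc0
        rw [htgt.1, htgt.2] at this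
        exact this
      · -- establish the mid invariant for the neighbour fold
        have hmid : pvDMid A m n t c0 D (pvNbrs c0.1 c0.2) stack' seen := by
          obtain ⟨core, hclosed⟩ := inv
          refine ⟨⟨core.rng, ?_, ?_, core.ndseen, core.snd, core.startm, ?_⟩, ?_⟩
          · intro c
            rw [core.ssub c]
            constructor
            · intro hc
              rcases List.mem_append.mp hc with hc | hc
              · exact List.mem_append_left _ (List.mem_append_left _ hc)
              · rcases List.mem_cons.mp hc with hc | hc
                · rw [hc]
                  exact List.mem_append_left _
                    (List.mem_append_right _ (List.mem_singleton.mpr rfl))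
                · exact List.mem_append_right _ hc
            · intro hc
              rcases List.mem_append.mp hc with hc | hc
              · rcases List.mem_append.mp hc with hc | hc
                · exact List.mem_append_left _ hc
                · rw [List.mem_singleton.mp hc]
                  exact List.mem_append_right _ (List.mem_cons_self ..)
              · exact List.mem_append_right _ (List.mem_cons_of_mem _ hc)
          · rw [List.append_assoc]
            exact core.nd
          · intro hmem
            rcases List.mem_append.mp hmem with hm | hm
            · exact core.tgtD hm
            · exact htgt ⟨by simpa using (congrArg Prod.fst (List.mem_singleton.mp hm)).symm,
                by simpa using (congrArg Prod.snd (List.mem_singleton.mp hm)).symm⟩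
          · intro c hc d hd hin hval hnotL
            rcases List.mem_append.mp hc with hc | hc
            · exact hclosed c hc d hd hin hval
            · exfalso
              have hceq := List.mem_singleton.mp hc
              rw [hceq] at hd
              exact hnotL hceq hd
        have fold := pvDMid_fold A m n t c0 D (pvNbrs c0.1 c0.2) stack' seen (fun d hd => hd) hmid
        have inv' : pvDInv A m n t ((pvNbrs c0.1 c0.2).foldl (pvDStepF A m n t) (stack', seen)).1
            ((pvNbrs c0.1 c0.2).foldl (pvDStepF A m n t) (stack', seen)).2 (D ++ [c0]) := by
          refine ⟨fold.1.1, ?_⟩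
          intro c hc d hd hin hval
          exact fold.1.2 c hc d hd hin hval (fun _ => by simp)
        have hres : pvReachLoop A m n t (fuel+1) (c0 :: stack') seen =
            pvReachLoop A m n t fuel ((pvNbrs c0.1 c0.2).foldl (pvDStepF A m n t) (stack', seen)).1
              ((pvNbrs c0.1 c0.2).foldl (pvDStepF A m n t) (stack', seen)).2 := by
          simp only [pvReachLoop]
          rw [if_neg htgt]
          rfl
        rw [hres]
        apply ih _ _ (D ++ [c0]) inv'
        have hm2 := fold.2
        simp only [List.length_cons] at hfuel
        omega
-- ## connectivity at the global minimum value
def pvMinV (A : List (List Int)) (m n : Int) : Int :=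
  ((pvCellsL m n).map (fun c => pvGV A c.1 c.2)).foldl min (pvGV A 0 0)

theorem pvMinV_le (A : List (List Int)) (m n : Int) (x y : Int)
    (hx0 : 0 ≤ x) (hxm : x < m) (hy0 : 0 ≤ y) (hyn : y < n) :
    pvMinV A m n ≤ pvGV A x y := by
  have hmem : (x, y) ∈ pvCellsL m n := (mem_pvCellsL m n (x,y)).mpr ⟨hx0, hxm, hy0, hyn⟩
  exact (PySem.List.foldl_min_le _ _).2 _ (List.mem_map_of_mem hmem)

theorem pvMinV_le00 (A : List (List Int)) (m n : Int) : pvMinV A m n ≤ pvGV A 0 0 :=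
  (PySem.List.foldl_min_le _ _).1

theorem pvConn (A : List (List Int)) (m n : Int) (hm0 : 0 < m) (hn0 : 0 < n) :
    ∀ (k : Nat) (x y : Int), 0 ≤ x → x < m → 0 ≤ y → y < n → x + y ≤ (k : Int) →
    pvReach A m n (pvMinV A m n) x y := by
  intro k
  induction k with
  | zero =>
    intro x y hx0 hxm hy0 hyn hk
    have hx : x = 0 := by omega
    have hy : y = 0 := by omega
    rw [hx, hy]
    exact pvReach.start (pvMinV_le00 A m n)
  | succ k ih =>
    intro x y hx0 hxm hy0 hyn hk
    by_cases hx : 0 < x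
    · have hprev := ih (x-1) y (by omega) (by omega) hy0 hyn (by omega)
      refine pvReach.step hprev ?_ hx0 hxm hy0 hyn (pvMinV_le A m n x y hx0 hxm hy0 hyn)
      unfold pvNbrs
      simp only [List.mem_cons, Prod.mk.injEq, List.not_mem_nil, or_false]
      exact Or.inr (Or.inl (by constructor <;> first | trivial | omega))
    · by_cases hy : 0 < y
      · have hxz : x = 0 := by omega
        have hprev := ih x (y-1) hx0 hxm (by omega) (by omega) (by omega)
        refine pvReach.step hprev ?_ hx0 hxm hy0 hyn (pvMinV_le A m n x y hx0 hxm hy0 hyn)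
        unfold pvNbrs
        simp only [List.mem_cons, Prod.mk.injEq, List.not_mem_nil, or_false]
        exact Or.inr (Or.inr (Or.inr (by constructor <;> first | trivial | omega)))
      · have hx' : x = 0 := by omega
        have hy' : y = 0 := by omega
        rw [hx', hy']
        exact pvReach.start (pvMinV_le00 A m n)

theorem pvConnTarget (A : List (List Int)) (m n : Int) (hm0 : 0 < m) (hn0 : 0 < n) :
    pvReach A m n (pvMinV A m n) (m-1) (n-1) :=
  pvConn A m n hm0 hn0 ((m-1) + (n-1)).toNat (m-1) (n-1)
    (by omega) (by omega) (by omega) (by omega) (by omega)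

-- ## B's flood-fill test decides reachability
theorem pvReaches_iff (A : List (List Int)) (m n t : Int) (hm0 : 0 < m) (hn0 : 0 < n)
    (h0 : t ≤ pvGV A 0 0) :
    (pvReaches A m n t = true ↔ pvReach A m n t (m-1) (n-1)) := by
  unfold pvReaches
  have hseen : (PySem.Set.add PySem.Set.empty ((0:Int),(0:Int))) = [((0:Int),(0:Int))] := rfl
  rw [hseen]
  apply pvDFS_iff A m n t (m.toNat * n.toNat) [((0:Int),(0:Int))] [((0:Int),(0:Int))] []
  · refine ⟨⟨?_, ?_, ?_, ?_, ?_, ?_, ?_⟩, ?_⟩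
    · intro c hc
      rw [List.mem_singleton.mp hc]
      exact ⟨le_refl _, hm0, le_refl _, hn0⟩
    · intro c; simp
    · simp
    · simp
    · intro c hc
      rw [List.mem_singleton.mp hc]
      exact pvReach.start h0
    · simp
    · simp
    · intro c hc; simp at hc
  · have hpos := Nat.mul_pos (show 0 < m.toNat by omega) (show 0 < n.toNat by omega)
    simp only [List.length_singleton]
    omega

theorem pvCheck_iff (A : List (List Int)) (m n t : Int) (hm0 : 0 < m) (hn0 : 0 < n) :
    ((t ≤ pvGV A 0 0 ∧ pvReaches A m n t = true) ↔ pvReach A m n t (m-1) (n-1)) := by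
  constructor
  · intro ⟨h0, hr⟩
    exact (pvReaches_iff A m n t hm0 hn0 h0).mp hr
  · intro hr
    have h0 := pvReach_start_le hr
    exact ⟨h0, (pvReaches_iff A m n t hm0 hn0 h0).mpr hr⟩

-- ## the descending scan returns the optimum
theorem pvScan_eq (A : List (List Int)) (m n r : Int) (hm0 : 0 < m) (hn0 : 0 < n)
    (hr : pvReach A m n r (m-1) (n-1)) (hmax : ∀ t, pvReach A m n t (m-1) (n-1) → t ≤ r) :
    ∀ l : List Int, l.Pairwise (fun a b => b ≤ a) → r ∈ l → pvScan A m n l = r := by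
  intro l
  induction l with
  | nil => intro _ hmem; simp at hmem
  | cons t rest ih =>
    intro hpw hmem
    have hiff := pvCheck_iff A m n t hm0 hn0
    by_cases hR : pvReach A m n t (m-1) (n-1)
    · have hres : pvScan A m n (t :: rest) = t := by
        simp only [pvScan]
        rw [if_pos (hiff.mpr hR)]
      rw [hres]
      have h1 : t ≤ r := hmax t hR
      rcases List.mem_cons.mp hmem with h | h
      · omega
      · have h2 : r ≤ t := (List.pairwise_cons.mp hpw).1 r h
        omega
    · have hres : pvScan A m n (t :: rest) = pvScan A m n rest := by
        simp only [pvScan]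
        rw [if_neg (fun hc => hR (hiff.mp hc))]
      rw [hres]
      have hrt : r ≠ t := fun h => hR (h ▸ hr)
      rcases List.mem_cons.mp hmem with h | h
      · exact absurd h hrt
      · exact ih (List.pairwise_cons.mp hpw).2 h

-- ## grid values occur in B's flattened value list
theorem pvGV_mem_flat (A : List (List Int)) (m n : Int)
    (hm : m = (A.length : Int))
    (hn : n = ((A.getD 0 []).length : Int))
    (hrows : ∀ r ∈ A, (A.getD 0 []).length ≤ r.length)
    (c : Int × Int) (hin : pvInR m n c) :
    pvGV A c.1 c.2 ∈ A.flatMap (fun row => PySem.List.slice row none (some n)) := by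
  obtain ⟨h10, h1m, h20, h2n⟩ := hin
  have hxN : c.1.toNat < A.length := by omega
  have hrowlen : (A.getD 0 []).length ≤ (A[c.1.toNat]).length := hrows _ (List.getElem_mem _)
  have hyN : c.2.toNat < (A[c.1.toNat]).length := by omega
  rw [pvGV_eq_getElem A c.1 c.2 h10 hxN h20 hyN]
  rw [List.mem_flatMap]
  refine ⟨A[c.1.toNat], List.getElem_mem _, ?_⟩
  rw [PySem.List.slice_to _ (by omega)]
  have hlt : c.2.toNat < (A[c.1.toNat].take n.toNat).length := by
    rw [List.length_take]; omega
  have : (A[c.1.toNat].take n.toNat)[c.2.toNat]'hlt = A[c.1.toNat][c.2.toNat] :=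
    List.getElem_take
  rw [← this]
  exact List.getElem_mem _

-- ## zeros of the fresh visited matrix
theorem pvCountP_replicate (N : Nat) :
    (List.replicate N (0:Int)).countP (fun v => v == 0) = N := by
  induction N with
  | zero => rfl
  | succ N ih => simp [List.replicate_succ, ih]

theorem pvZeros_replicate (M N : Nat) :
    pvZeros (List.replicate M (List.replicate N (0:Int))) = M * N := by
  unfold pvZeros
  rw [List.map_replicate, pvCountP_replicate, List.sum_replicate, smul_eq_mul]
-- ## the initial state of A's search satisfies the invariant
theorem pvInit_inv (A : List (List Int)) (m n : Int) (hm0 : 0 < m) (hn0 : 0 < n) :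
    pvInv A m n [(-(pvGV A 0 0), 0, 0)] []
      (pvMark (List.replicate m.toNat (List.replicate n.toNat 0)) 0 0) := by
  have hbase : pvShape (List.replicate m.toNat (List.replicate n.toNat (0:Int))) m.toNat n.toNat := by
    refine ⟨by simp, ?_⟩
    intro r hr
    rw [List.eq_of_mem_replicate hr]
    simp
  have hmN : (0:Int) < (m.toNat : Int) := by omega
  have hnN : (0:Int) < (n.toNat : Int) := by omega
  refine ⟨⟨hm0, hn0, ?_, ?_, ?_, ?_, ?_, ?_, ?_, ?_, ?_, ?_, ?_, ?_, ?_, ?_, ?_⟩, ?_⟩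
  · exact pvMark_shape _ _ _ hbase 0 0 (le_refl _) hmN (le_refl _)
  · intro e he
    rw [List.mem_singleton.mp he]
    exact ⟨le_refl _, hm0, le_refl _, hn0⟩
  · intro e he; simp at he
  · -- visIff
    intro x y hx0 hxm hy0 hyn
    have hmark := pvGV_mark _ m.toNat n.toNat hbase 0 0 x y (le_refl _) hmN (le_refl _) hnN
      hx0 (by omega) hy0 (by omega)
    rw [hmark]
    by_cases hxy : x = 0 ∧ y = 0
    · rw [if_pos hxy]
      simp only [List.map_nil, List.nil_append, List.map_cons, List.map_nil, List.mem_singleton]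
      constructor
      · intro _
        unfold pvCellOf
        exact Prod.ext_iff.mpr ⟨by simpa using hxy.1, by simpa using hxy.2⟩
      · intro _; norm_num
    · rw [if_neg hxy, pvGV_replicate]
      simp only [ne_eq, not_true_eq_false, List.map_nil, List.nil_append, List.map_cons,
        List.map_nil, List.mem_singleton, false_iff]
      intro heq
      exact hxy ⟨by simpa [pvCellOf] using congrArg Prod.fst heq,
        by simpa [pvCellOf] using congrArg Prod.snd heq⟩
  · simp
  · -- sndQ
    intro e he
    rw [List.mem_singleton.mp he]
    show pvReach A m n (-(-(pvGV A 0 0))) 0 0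
    rw [neg_neg]
    exact pvReach.start (le_refl _)
  · intro p hp; simp at hp
  · intro p hp; simp at hp
  · -- stQ
    intro e he _ _
    rw [List.mem_singleton.mp he]
    simp
  · intro p hp; simp at hp
  · -- qpar
    intro e he
    rw [List.mem_singleton.mp he]
    exact Or.inl ⟨rfl, rfl⟩
  · -- valQ
    intro e he
    rw [List.mem_singleton.mp he]
    exact ⟨(0,0), ⟨le_refl _, hm0, le_refl _, hn0⟩, by simp⟩
  · intro p hp; simp at hp
  · -- startMem
    simp [pvCellOf]
  · simp
  · intro p hp; simp at hp

-- ## the two ports agree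
theorem pvMain (A : List (List Int)) (hpre : Pre_maximumMinimumPath2 A) :
    maximumMinimumPath2 A = maximumMinimumPath2_alt A := by
  obtain ⟨hA, hr0, hrows⟩ := hpre
  have hgd : PySem.List.pyGetD A 0 ([] : List Int) = A.getD 0 [] := PySem.List.pyGetD_zero A []
  have hmEq : PySem.List.len A = (A.length : Int) := PySem.List.len_eq A
  have hnEq : PySem.List.len (PySem.List.pyGetD A 0 ([] : List Int))
      = ((A.getD 0 []).length : Int) := by rw [hgd]; exact PySem.List.len_eq _
  have hm0 : 0 < PySem.List.len A := by
    rw [hmEq]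
    have := List.length_pos_iff.mpr hA
    omega
  have hn0 : 0 < PySem.List.len (PySem.List.pyGetD A 0 ([] : List Int)) := by
    rw [hnEq]
    have := List.length_pos_iff.mpr hr0
    omega
  have hconn := pvConnTarget A (PySem.List.len A)
    (PySem.List.len (PySem.List.pyGetD A 0 ([] : List Int))) hm0 hn0
  have hinv := pvInit_inv A (PySem.List.len A)
    (PySem.List.len (PySem.List.pyGetD A 0 ([] : List Int))) hm0 hn0
  have hz : pvZeros (pvMark (List.replicate (PySem.List.len A).toNat
      (List.replicate (PySem.List.len (PySem.List.pyGetD A 0 ([] : List Int))).toNat 0)) 0 0) + 1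
      = (PySem.List.len A).toNat
        * (PySem.List.len (PySem.List.pyGetD A 0 ([] : List Int))).toNat := by
    have hbase : pvShape (List.replicate (PySem.List.len A).toNat
        (List.replicate (PySem.List.len (PySem.List.pyGetD A 0 ([] : List Int))).toNat (0:Int)))
        (PySem.List.len A).toNat
        (PySem.List.len (PySem.List.pyGetD A 0 ([] : List Int))).toNat := by
      refine ⟨by simp, ?_⟩
      intro r hr
      rw [List.eq_of_mem_replicate hr]
      simp
    rw [pvZeros_mark _ _ _ hbase 0 0 (le_refl _) (by omega) (le_refl _) (by omega)
      (pvGV_replicate _ _ 0 0)]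
    exact pvZeros_replicate _ _
  have hans := pvLoopA_correct A (PySem.List.len A)
    (PySem.List.len (PySem.List.pyGetD A 0 ([] : List Int)))
    (pvMinV A (PySem.List.len A) (PySem.List.len (PySem.List.pyGetD A 0 ([] : List Int))))
    hconn
    ((PySem.List.len A).toNat * (PySem.List.len (PySem.List.pyGetD A 0 ([] : List Int))).toNat)
    [(-(pvGV A 0 0), 0, 0)] []
    (pvMark (List.replicate (PySem.List.len A).toNat
      (List.replicate (PySem.List.len (PySem.List.pyGetD A 0 ([] : List Int))).toNat 0)) 0 0)
    hinv
    (by simp only [List.length_singleton]; omega)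
  have hAeq : maximumMinimumPath2 A = pvLoopA A (PySem.List.len A)
      (PySem.List.len (PySem.List.pyGetD A 0 ([] : List Int)))
      ((PySem.List.len A).toNat * (PySem.List.len (PySem.List.pyGetD A 0 ([] : List Int))).toNat)
      [(-(pvGV A 0 0), 0, 0)]
      (pvMark (List.replicate (PySem.List.len A).toNat
        (List.replicate (PySem.List.len (PySem.List.pyGetD A 0 ([] : List Int))).toNat 0)) 0 0) := rfl
  rw [hAeq]
  obtain ⟨hr, hmax, c, hcin, hval⟩ := hans
  have hmem_flat : pvLoopA A (PySem.List.len A)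
      (PySem.List.len (PySem.List.pyGetD A 0 ([] : List Int)))
      ((PySem.List.len A).toNat * (PySem.List.len (PySem.List.pyGetD A 0 ([] : List Int))).toNat)
      [(-(pvGV A 0 0), 0, 0)]
      (pvMark (List.replicate (PySem.List.len A).toNat
        (List.replicate (PySem.List.len (PySem.List.pyGetD A 0 ([] : List Int))).toNat 0)) 0 0)
      ∈ A.flatMap (fun row => PySem.List.slice row none
          (some (PySem.List.len (PySem.List.pyGetD A 0 ([] : List Int))))) := by
    rw [hval]
    exact pvGV_mem_flat A _ _ hmEq hnEq hrows c hcin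
  have hmem_vals := (PySem.List.mem_sorted _ (fun v => v) true _).mpr
    ((PySem.Set.mem_ofList _ _).mpr hmem_flat)
  have hpw := PySem.List.sorted_pairwise_rev
    (PySem.Set.ofList (A.flatMap (fun row => PySem.List.slice row none
      (some (PySem.List.len (PySem.List.pyGetD A 0 ([] : List Int))))))) (fun v => v)
  exact (pvScan_eq A _ _ _ hm0 hn0 hr hmax _ hpw hmem_vals).symm

-- ===== VERDICT (by name: the statement is the Claim_ definition above) =====
theorem maximumMinimumPath2_spec : Claim_equal_maximumMinimumPath2 := by
  intro A _ hpre
  unfold Spec_maximumMinimumPath2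
  exact pvMain A hpre
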